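-- pv_equiv track=rewrite | github.com/SIUUU42/Tech-Bandits | providers/opensky.py | infer_airline_from_callsign
-- ===== SOURCE A (Python) =====
-- def infer_airline_from_callsign(callsign: str) -> str:
--     """
--     Attempt to infer airline name from callsign prefix.
--
--     Args:
--         callsign: Aircraft callsign (e.g., "AI203", "UAE512")
--
--     Returns:
--         Airline name or origin country
--     """
--     if not callsign:
--         return "Unknown"
--
--     # Common Indian airline prefixes
--     airline_map = {
--         "AI": "Air India",
--         "AIC": "Air India",
--         "SG": "SpiceJet",
--         "SGJ": "SpiceJet",
--         "6E": "IndiGo",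
--         "IGO": "IndiGo",
--         "UK": "Vistara",
--         "VTI": "Vistara",
--         "9I": "Alliance Air",
--         "G8": "GoAir",
--         "GES": "GoAir",
--         "I5": "AirAsia India",
--     }
--
--     # Check first 2-3 characters
--     for prefix, airline in airline_map.items():
--         if callsign.upper().startswith(prefix):
--             return airline
--
--     return "Unknown Airline"
-- ===== SOURCE B (Python) =====
-- AIRLINE_MAP = {
--     "AI": "Air India",
--     "AIC": "Air India",
--     "SG": "SpiceJet",
--     "SGJ": "SpiceJet",
--     "6E": "IndiGo",
--     "IGO": "IndiGo",
--     "UK": "Vistara",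
--     "VTI": "Vistara",
--     "9I": "Alliance Air",
--     "G8": "GoAir",
--     "GES": "GoAir",
--     "I5": "AirAsia India",
-- }
--
--
-- def infer_airline_from_callsign(callsign: str) -> str:
--     if not callsign:
--         return "Unknown"
--     up = callsign.upper()
--     # Every key has length 2 or 3, so two direct hash lookups replace the scan.
--     # Overlapping prefixes (AI/AIC, SG/SGJ) share the same airline, so order is immaterial.
--     hit = AIRLINE_MAP.get(up[:2])
--     if hit is not None:
--         return hit
--     hit = AIRLINE_MAP.get(up[:3])
--     if hit is not None:
--         return hit
--     return "Unknown Airline"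
-- ===== Notes on version B (the rewrite author's own statement) =====
-- stated objective: simpler
-- what changed: Replaced A's linear scan over all 12 map entries with startswith tests by computing the two candidate prefixes up[:2] and up[:3] once and doing two direct dict lookups (overlapping keys share the same airline, so lookup order is immaterial).
import Mathlib
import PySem

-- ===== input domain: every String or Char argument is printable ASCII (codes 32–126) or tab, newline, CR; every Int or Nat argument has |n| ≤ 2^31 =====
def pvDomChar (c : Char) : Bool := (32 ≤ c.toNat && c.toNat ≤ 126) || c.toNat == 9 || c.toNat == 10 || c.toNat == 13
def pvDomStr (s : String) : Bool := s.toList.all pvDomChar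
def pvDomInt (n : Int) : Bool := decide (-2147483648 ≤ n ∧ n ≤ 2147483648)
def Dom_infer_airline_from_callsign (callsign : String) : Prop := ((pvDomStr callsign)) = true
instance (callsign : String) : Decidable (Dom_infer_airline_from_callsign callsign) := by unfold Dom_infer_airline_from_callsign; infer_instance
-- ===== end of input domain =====

-- B replaces A's linear scan over the prefix table by two direct dict lookups on the
-- uppercased callsign's 2- and 3-character prefixes (simpler; same return value everywhere).

-- ===== PORT A =====
def pvAirlineItemsA : List (String × String) :=
  [("AI", "Air India"), ("AIC", "Air India"), ("SG", "SpiceJet"), ("SGJ", "SpiceJet"),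
   ("6E", "IndiGo"), ("IGO", "IndiGo"), ("UK", "Vistara"), ("VTI", "Vistara"),
   ("9I", "Alliance Air"), ("G8", "GoAir"), ("GES", "GoAir"), ("I5", "AirAsia India")]

-- the 'for prefix, airline in airline_map.items(): if callsign.upper().startswith(prefix): return airline' loop
def pvScanA (callsign : String) : List (String × String) → String
  | [] => "Unknown Airline"
  | (pfx, airline) :: rest =>
    if PySem.Str.startswith (PySem.Str.upper callsign) pfx then airline
    else pvScanA callsign rest

def infer_airline_from_callsign (callsign : String) : String :=
  if callsign = "" then "Unknown"
  else pvScanA callsign (PySem.Dict.ofList pvAirlineItemsA).items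

-- ===== PORT B =====
-- module-level AIRLINE_MAP of Source B
def pvAIRLINE_MAP : PySem.Dict String String :=
  PySem.Dict.ofList
    [("AI", "Air India"), ("AIC", "Air India"), ("SG", "SpiceJet"), ("SGJ", "SpiceJet"),
     ("6E", "IndiGo"), ("IGO", "IndiGo"), ("UK", "Vistara"), ("VTI", "Vistara"),
     ("9I", "Alliance Air"), ("G8", "GoAir"), ("GES", "GoAir"), ("I5", "AirAsia India")]

def infer_airline_from_callsign_alt (callsign : String) : String :=
  if callsign = "" then "Unknown"
  else
    let up := PySem.Str.upper callsign
    match pvAIRLINE_MAP.get? (PySem.Str.slice up none (some 2)) with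
    | some hit => hit
    | none =>
      match pvAIRLINE_MAP.get? (PySem.Str.slice up none (some 3)) with
      | some hit => hit
      | none => "Unknown Airline"

-- ===== PRECONDITION & SPEC =====
def Spec_infer_airline_from_callsign (callsign : String) (out : String) : Prop := out = infer_airline_from_callsign_alt callsign
instance (callsign : String) (out : String) : Decidable (Spec_infer_airline_from_callsign callsign out) := by unfold Spec_infer_airline_from_callsign; infer_instance

-- ===== CLAIM (what is proved, stated in full; the proofs are below) =====
def Claim_equal_infer_airline_from_callsign : Prop := ∀ (callsign : String), Dom_infer_airline_from_callsign callsign → Spec_infer_airline_from_callsign callsign (infer_airline_from_callsign callsign)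

-- ===== LEMMAS AND PROOFS =====
lemma str_beq_toList (a b : String) : (a == b) = decide (a.toList = b.toList) := by
  by_cases h : a = b
  · subst h; simp
  · have hne : a.toList ≠ b.toList := fun hc => h (String.toList_inj.mp hc)
    simp [h, hne]

lemma items_lit : (PySem.Dict.ofList pvAirlineItemsA).items = pvAirlineItemsA := by decide

lemma map_mk : pvAIRLINE_MAP = PySem.Dict.mk
    [("AI", "Air India"), ("AIC", "Air India"), ("SG", "SpiceJet"), ("SGJ", "SpiceJet"),
     ("6E", "IndiGo"), ("IGO", "IndiGo"), ("UK", "Vistara"), ("VTI", "Vistara"),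
     ("9I", "Alliance Air"), ("G8", "GoAir"), ("GES", "GoAir"), ("I5", "AirAsia India")] := by decide

lemma slice_toList (u : String) (b : Nat) :
    (PySem.Str.slice u none (some (b : Int))).toList = u.toList.take b := by
  simp [PySem.Str.toList_slice, PySem.List.slice_to_natCast]

lemma get?_mk_nil (k : String) : (PySem.Dict.mk ([] : List (String × String))).get? k = none := rfl

set_option maxHeartbeats 4000000 in
lemma pv_core (callsign : String) :
    infer_airline_from_callsign callsign = infer_airline_from_callsign_alt callsign := by
  unfold infer_airline_from_callsign infer_airline_from_callsign_alt
  by_cases h : callsign = ""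
  · simp [h]
  · simp only [if_neg h]
    rw [items_lit, map_mk]
    simp only [pvAirlineItemsA, pvScanA]
    simp only [PySem.Dict.get?_mk_cons, str_beq_toList, PySem.Str.startswith_eq,
      PySem.Str.toList_upper, PySem.Str.toList_slice, PySem.Chars.slice_eq_listSlice]
    have h2 := slice_toList (PySem.Str.upper callsign) 2
    have h3 := slice_toList (PySem.Str.upper callsign) 3
    norm_num [PySem.Str.toList_upper] at h2 h3
    simp only [h2, h3]
    clear h2 h3 h
    have e0 : ("AI" : String).toList = ['A', 'I'] := by decide
    have e1 : ("AIC" : String).toList = ['A', 'I', 'C'] := by decide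
    have e2 : ("SG" : String).toList = ['S', 'G'] := by decide
    have e3 : ("SGJ" : String).toList = ['S', 'G', 'J'] := by decide
    have e4 : ("6E" : String).toList = ['6', 'E'] := by decide
    have e5 : ("IGO" : String).toList = ['I', 'G', 'O'] := by decide
    have e6 : ("UK" : String).toList = ['U', 'K'] := by decide
    have e7 : ("VTI" : String).toList = ['V', 'T', 'I'] := by decide
    have e8 : ("9I" : String).toList = ['9', 'I'] := by decide
    have e9 : ("G8" : String).toList = ['G', '8'] := by decide
    have e10 : ("GES" : String).toList = ['G', 'E', 'S'] := by decide
    have e11 : ("I5" : String).toList = ['I', '5'] := by decide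
    simp only [PySem.Chars.startswith_iff, List.prefix_iff_eq_take,
      e0, e1, e2, e3, e4, e5, e6, e7, e8, e9, e10, e11,
      List.length_cons, List.length_nil, decide_eq_true_eq, get?_mk_nil]
    norm_num
    generalize PySem.Chars.upper callsign.toList = l
    rcases l with _ | ⟨c1, _ | ⟨c2, _ | ⟨c3, rest⟩⟩⟩ <;>
      simp only [List.take_succ_cons, List.take_nil, List.take_zero, List.cons.injEq, @eq_comm Char,
        and_true, and_false, reduceCtorEq, if_false,
        List.cons_ne_nil] <;>
      split_ifs <;> simp_all

-- ===== VERDICT (by name: the statement is the Claim_ definition above) =====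
theorem infer_airline_from_callsign_spec : Claim_equal_infer_airline_from_callsign := by
  intro callsign _
  unfold Spec_infer_airline_from_callsign
  exact pv_core callsign
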